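-- pv_equiv track=rewrite | github.com/guanqiao/auto-ut-agent | pyutagent/agent/style_analyzer.py | _determine_import_order
-- ===== SOURCE A (Python) =====
-- from typing import Any, Dict, List, Optional, Tuple
--
-- def _determine_import_order(imports: List[str]) -> List[str]:
--     """Determine import ordering pattern."""
--     if not imports:
--         return []
--
--     order = []
--     has_java = any(i.startswith("java.") for i in imports)
--     has_javax = any(i.startswith("javax.") for i in imports)
--     has_org = any(i.startswith("org.") for i in imports)
--     has_com = any(i.startswith("com.") for i in imports)
--
--     if has_java:
--         order.append("java.*")
--     if has_javax:
--         order.append("javax.*")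
--     if has_org:
--         order.append("org.*")
--     if has_com:
--         order.append("com.*")
--
--     return order
-- ===== SOURCE B (Python) =====
-- def _determine_import_order(imports):
--     """Determine import ordering pattern (single collecting pass + ordered table emit)."""
--     if not imports:
--         return []
--     table = [("java.", "java.*"), ("javax.", "javax.*"), ("org.", "org.*"), ("com.", "com.*")]
--     seen = set()
--     for imp in imports:
--         for prefix, _label in table:
--             if imp.startswith(prefix):
--                 seen.add(prefix)
--                 break
--     return [label for prefix, label in table if prefix in seen]
-- ===== Notes on version B (the rewrite author's own statement) =====
-- stated objective: simpler
-- what changed: Replaces four separate any() scans over the list plus four append branches with a single collecting pass that records each import's (unique) matched prefix in a set, then emits labels by filtering a fixed ordered prefix->label table.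
import Mathlib
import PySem

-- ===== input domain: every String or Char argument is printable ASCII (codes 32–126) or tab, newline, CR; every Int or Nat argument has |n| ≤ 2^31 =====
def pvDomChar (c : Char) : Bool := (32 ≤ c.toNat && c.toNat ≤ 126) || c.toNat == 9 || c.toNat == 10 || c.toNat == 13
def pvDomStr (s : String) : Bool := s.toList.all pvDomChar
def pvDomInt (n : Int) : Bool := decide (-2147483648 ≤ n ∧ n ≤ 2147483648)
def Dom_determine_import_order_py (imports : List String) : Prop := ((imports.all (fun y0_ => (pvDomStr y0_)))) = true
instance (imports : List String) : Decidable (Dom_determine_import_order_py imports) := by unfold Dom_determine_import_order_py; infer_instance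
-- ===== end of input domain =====

-- B replaces A's four separate any() scans with one collecting pass into a set plus an ordered table emit (objective: simpler).

-- ===== PORT A =====
def determine_import_order_py (imports : List String) : List String :=
  if imports = [] then []
  else
    let has_java := imports.any (fun i => PySem.Str.startswith i "java.")
    let has_javax := imports.any (fun i => PySem.Str.startswith i "javax.")
    let has_org := imports.any (fun i => PySem.Str.startswith i "org.")
    let has_com := imports.any (fun i => PySem.Str.startswith i "com.")
    let order : List String := []
    let order := if has_java then order ++ ["java.*"] else order
    let order := if has_javax then order ++ ["javax.*"] else order
    let order := if has_org then order ++ ["org.*"] else order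
    let order := if has_com then order ++ ["com.*"] else order
    order

-- ===== PORT B =====
def pvTable : List (String × String) :=
  [("java.", "java.*"), ("javax.", "javax.*"), ("org.", "org.*"), ("com.", "com.*")]

-- inner 'for prefix, _label in table: if imp.startswith(prefix): seen.add(prefix); break'
def pvStep (seen : PySem.Set String) (imp : String) : PySem.Set String :=
  match pvTable.find? (fun pr => PySem.Str.startswith imp pr.1) with
  | some pr => PySem.Set.add seen pr.1
  | none => seen

def determine_import_order_py_alt (imports : List String) : List String :=
  if imports = [] then []
  else
    let seen := imports.foldl pvStep PySem.Set.empty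
    (pvTable.filter (fun pr => PySem.Set.contains seen pr.1)).map Prod.snd

-- ===== PRECONDITION & SPEC =====
def Spec_determine_import_order_py (imports : List String) (out : List String) : Prop := out = determine_import_order_py_alt imports
instance (imports : List String) (out : List String) : Decidable (Spec_determine_import_order_py imports out) := by unfold Spec_determine_import_order_py; infer_instance

-- ===== CLAIM (what is proved, stated in full; the proofs are below) =====
def Claim_equal_determine_import_order_py : Prop := ∀ (imports : List String), Dom_determine_import_order_py imports → Spec_determine_import_order_py imports (determine_import_order_py imports)

-- ===== LEMMAS AND PROOFS =====

-- two incomparable strings cannot both be prefixes of the same string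
theorem pv_prefix_incomp (i p q : String)
    (h1 : ¬ (p.toList <+: q.toList)) (h2 : ¬ (q.toList <+: p.toList))
    (hp : PySem.Str.startswith i p = true) : PySem.Str.startswith i q = false := by
  simp only [PySem.Str.startswith_eq] at *
  rw [PySem.Chars.startswith_iff] at hp
  by_contra h
  rw [Bool.not_eq_false, PySem.Chars.startswith_iff] at h
  rcases List.prefix_or_prefix_of_prefix hp h with h' | h' <;> contradiction

theorem pv_contains_add (s : PySem.Set String) (q p : String) :
    PySem.Set.contains (PySem.Set.add s q) p = (PySem.Set.contains s p || decide (p = q)) := by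
  rw [PySem.Set.add_eq_ite]
  split
  · rename_i hq
    by_cases hpq : p = q
    · subst hpq
      simp [PySem.Set.contains_eq_listContains, List.contains_iff_mem, hq]
    · simp [hpq]
  · simp [PySem.Set.contains_eq_listContains, List.contains_iff_mem]

theorem pv_contains_step (s : PySem.Set String) (i p : String)
    (hp : p = "java." ∨ p = "javax." ∨ p = "org." ∨ p = "com.") :
    PySem.Set.contains (pvStep s i) p = (PySem.Set.contains s p || PySem.Str.startswith i p) := by
  unfold pvStep pvTable
  simp only [List.find?]
  cases hA : PySem.Str.startswith i "java." with
  | true =>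
    have h1 := pv_prefix_incomp i "java." "javax." (by decide) (by decide) hA
    have h2 := pv_prefix_incomp i "java." "org." (by decide) (by decide) hA
    have h3 := pv_prefix_incomp i "java." "com." (by decide) (by decide) hA
    simp only [hA, cond_true]
    simp only [PySem.Str.startswith_eq] at hA h1 h2 h3
    rcases hp with rfl | rfl | rfl | rfl <;> simp_all [pv_contains_add]
  | false =>
    simp only [hA, cond_false]
    cases hB : PySem.Str.startswith i "javax." with
    | true =>
      have h2 := pv_prefix_incomp i "javax." "org." (by decide) (by decide) hB
      have h3 := pv_prefix_incomp i "javax." "com." (by decide) (by decide) hB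
      simp only [hB, cond_true]
      simp only [PySem.Str.startswith_eq] at hA hB h2 h3
      rcases hp with rfl | rfl | rfl | rfl <;> simp_all [pv_contains_add]
    | false =>
      simp only [hB, cond_false]
      cases hC : PySem.Str.startswith i "org." with
      | true =>
        have h3 := pv_prefix_incomp i "org." "com." (by decide) (by decide) hC
        simp only [hC, cond_true]
        simp only [PySem.Str.startswith_eq] at hA hB hC h3
        rcases hp with rfl | rfl | rfl | rfl <;> simp_all [pv_contains_add]
      | false =>
        simp only [hC, cond_false]
        cases hD : PySem.Str.startswith i "com." with
        | true =>
          simp only [hD, cond_true]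
          simp only [PySem.Str.startswith_eq] at hA hB hC hD
          rcases hp with rfl | rfl | rfl | rfl <;> simp_all [pv_contains_add]
        | false =>
          simp only [hD, cond_false]
          simp only [PySem.Str.startswith_eq] at hA hB hC hD
          rcases hp with rfl | rfl | rfl | rfl <;> simp_all

theorem pv_contains_foldl (l : List String) (s : PySem.Set String) (p : String)
    (hp : p = "java." ∨ p = "javax." ∨ p = "org." ∨ p = "com.") :
    PySem.Set.contains (l.foldl pvStep s) p
      = (PySem.Set.contains s p || l.any (fun i => PySem.Str.startswith i p)) := by
  induction l generalizing s with
  | nil => simp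
  | cons x xs ih =>
    simp only [List.foldl_cons, List.any_cons]
    rw [ih, pv_contains_step s x p hp, Bool.or_assoc]

theorem pv_mem_foldl_empty (l : List String) (p : String)
    (hp : p = "java." ∨ p = "javax." ∨ p = "org." ∨ p = "com.") :
    decide (p ∈ l.foldl pvStep PySem.Set.empty)
      = l.any (fun i => PySem.Str.startswith i p) := by
  have h := pv_contains_foldl l PySem.Set.empty p hp
  simpa [PySem.Set.empty, PySem.Set.contains_eq_listContains, List.contains_eq_mem] using h

theorem determine_import_order_py_spec_aux (imports : List String) :
    determine_import_order_py imports = determine_import_order_py_alt imports := by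
  unfold determine_import_order_py determine_import_order_py_alt
  by_cases h : imports = []
  · simp [h]
  · simp only [if_neg h]
    have hja := pv_mem_foldl_empty imports "java." (Or.inl rfl)
    have hjx := pv_mem_foldl_empty imports "javax." (Or.inr (Or.inl rfl))
    have hor := pv_mem_foldl_empty imports "org." (Or.inr (Or.inr (Or.inl rfl)))
    have hco := pv_mem_foldl_empty imports "com." (Or.inr (Or.inr (Or.inr rfl)))
    simp only [pvTable, List.filter, PySem.Set.contains_eq_listContains, List.contains_eq_mem,
      hja, hjx, hor, hco]
    cases imports.any (fun i => PySem.Str.startswith i "java.") <;>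
    cases imports.any (fun i => PySem.Str.startswith i "javax.") <;>
    cases imports.any (fun i => PySem.Str.startswith i "org.") <;>
    cases imports.any (fun i => PySem.Str.startswith i "com.") <;> simp

-- ===== VERDICT (by name: the statement is the Claim_ definition above) =====
theorem determine_import_order_py_spec : Claim_equal_determine_import_order_py := by
  intro imports _
  exact determine_import_order_py_spec_aux imports
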